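-- pv_equiv track=rewrite | github.com/V-Seidel/Algorithms-MC102 | lab09.py | commum_supermatrix
-- ===== SOURCE A (Python) =====
-- def number_commum_elements(matrix_number_1, matrix_number_2):
--     """Função que recebe duas matrizes e retorna uma matriz de interseção entre elas"""
--     intersection_matrix = []
--     for i in range(len(matrix_number_1)):
--         for j in range(len(matrix_number_2)):
--             temp = set(matrix_number_2[j])
--             intersection_row = [x for x in matrix_number_1[i] if x in temp]
--             intersection_matrix.append(intersection_row)
--     return intersection_matrix
--
-- def commum_supermatrix(matrix_number_1, matrix_number_2, order_number_1, order_number_2):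
--     """Dada duas matrizes, a ordem da supermatriz é dada pela fórmula observada e escrita na linha 4"""
--
--     if matrix_number_2 > matrix_number_1:
--         matrix_number_1, matrix_number_2 = matrix_number_2, matrix_number_1
--
--     intersection_matrix = number_commum_elements(
--         matrix_number_1, matrix_number_2)
--     intersection_matrix = [x for x in intersection_matrix if x]
--
--     intersection_rows = len(intersection_matrix)
--     intersection_columns = len(intersection_matrix[0])
--
--     supermatrix_row = order_number_1 + order_number_2 - intersection_rows
--     supermatrix_column = order_number_1 + order_number_2 - intersection_columns
--
--     return supermatrix_row, supermatrix_column
-- ===== SOURCE B (Python) =====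
-- def commum_supermatrix(matrix_number_1, matrix_number_2, order_number_1, order_number_2):
--     if matrix_number_2 > matrix_number_1:
--         matrix_number_1, matrix_number_2 = matrix_number_2, matrix_number_1
--
--     # inverted index: element value -> set of row indices of matrix_number_2 containing it
--     index = {}
--     for j in range(len(matrix_number_2)):
--         for x in matrix_number_2[j]:
--             index.setdefault(x, set()).add(j)
--
--     pairs = 0
--     first_len = None
--     for row in matrix_number_1:
--         hits = set()
--         for x in set(row):
--             hits |= index.get(x, set())
--         pairs += len(hits)
--         if first_len is None and hits:
--             j0 = min(hits)
--             first_len = sum(1 for x in row if j0 in index.get(x, ()))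
--
--     return (order_number_1 + order_number_2 - pairs,
--             order_number_1 + order_number_2 - first_len)
-- ===== Notes on version B (the rewrite author's own statement) =====
-- stated objective: faster
-- what changed: B never computes any intersection row: it builds an inverted index from element value to the set of matrix_number_2 row indices containing it, then for each row of matrix_number_1 unions the index sets of its elements to get the hit indices directly (pair count = sum of hit-set sizes, first length = membership count against the minimal hit index), eliminating A's per-pair intersection build over all n*m pairs.
import Mathlib
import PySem

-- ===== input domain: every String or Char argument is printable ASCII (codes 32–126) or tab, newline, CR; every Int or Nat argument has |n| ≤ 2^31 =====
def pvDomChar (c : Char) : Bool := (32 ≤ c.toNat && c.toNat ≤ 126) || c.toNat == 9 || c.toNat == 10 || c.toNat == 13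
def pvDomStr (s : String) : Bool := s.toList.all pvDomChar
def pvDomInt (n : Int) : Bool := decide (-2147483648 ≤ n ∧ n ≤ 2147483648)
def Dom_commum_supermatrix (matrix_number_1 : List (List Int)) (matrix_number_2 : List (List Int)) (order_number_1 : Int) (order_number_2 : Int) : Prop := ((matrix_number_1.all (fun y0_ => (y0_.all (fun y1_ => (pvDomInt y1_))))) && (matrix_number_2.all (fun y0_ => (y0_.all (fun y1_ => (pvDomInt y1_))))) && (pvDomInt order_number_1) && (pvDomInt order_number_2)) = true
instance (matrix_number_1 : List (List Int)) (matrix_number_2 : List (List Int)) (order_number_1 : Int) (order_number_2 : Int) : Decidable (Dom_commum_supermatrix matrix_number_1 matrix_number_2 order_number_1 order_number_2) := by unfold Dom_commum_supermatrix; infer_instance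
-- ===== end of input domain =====

-- B replaces A's build-and-filter of all pairwise intersection rows by an inverted
-- index (element value -> set of matrix_number_2 row indices), from which the pair
-- count and the first intersection length are read off directly (measured faster).

-- ===== PORT A =====
-- Python's list comparison `matrix_number_2 > matrix_number_1` (lexicographic on
-- lists of lists of ints), ported by hand, exact for these element types.
def pyLtIntList : List Int → List Int → Bool
  | [], [] => false
  | [], _ :: _ => true
  | _ :: _, [] => false
  | a :: as, b :: bs => if a < b then true else if b < a then false else pyLtIntList as bs

def pyLtMat : List (List Int) → List (List Int) → Bool
  | [], [] => false
  | [], _ :: _ => true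
  | _ :: _, [] => false
  | a :: as, b :: bs => if pyLtIntList a b then true else if pyLtIntList b a then false else pyLtMat as bs

def number_commum_elements (matrix_number_1 : List (List Int)) (matrix_number_2 : List (List Int)) : List (List Int) :=
  (PySem.List.pyRange 0 (PySem.List.len matrix_number_1)).foldl (fun acc i =>
    (PySem.List.pyRange 0 (PySem.List.len matrix_number_2)).foldl (fun acc j =>
      acc ++ [(PySem.List.pyGetD matrix_number_1 i []).filter
                (fun x => (PySem.Set.ofList (PySem.List.pyGetD matrix_number_2 j [])).contains x)]) acc) []

def commum_supermatrix (matrix_number_1 : List (List Int)) (matrix_number_2 : List (List Int)) (order_number_1 : Int) (order_number_2 : Int) : Int × Int :=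
  let p := if pyLtMat matrix_number_1 matrix_number_2 then (matrix_number_2, matrix_number_1) else (matrix_number_1, matrix_number_2)
  let intersection_matrix := (number_commum_elements p.1 p.2).filter (fun x => !x.isEmpty)
  let intersection_rows : Int := PySem.List.len intersection_matrix
  -- intersection_matrix[0] raises IndexError when empty: those inputs are outside Pre_
  let intersection_columns : Int := PySem.List.len ((PySem.List.pyGet? intersection_matrix 0).getD [])
  (order_number_1 + order_number_2 - intersection_rows, order_number_1 + order_number_2 - intersection_columns)

-- ===== PORT B =====
def commum_supermatrix_alt (matrix_number_1 : List (List Int)) (matrix_number_2 : List (List Int)) (order_number_1 : Int) (order_number_2 : Int) : Int × Int :=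
  let p := if pyLtMat matrix_number_1 matrix_number_2 then (matrix_number_2, matrix_number_1) else (matrix_number_1, matrix_number_2)
  -- index.setdefault(x, set()).add(j) : index[x] becomes index.get(x, set()) ∪ {j}
  -- in place; PySem.Dict.modify x empty (add · j) is exactly that dict update.
  let index : PySem.Dict Int (PySem.Set Int) :=
    (PySem.List.pyRange 0 (PySem.List.len p.2)).foldl (fun d j =>
      (PySem.List.pyGetD p.2 j []).foldl (fun d x =>
        d.modify x PySem.Set.empty (fun s => PySem.Set.add s j)) d) PySem.Dict.empty
  let st : Int × Option Int := p.1.foldl (fun st row =>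
    let hits : PySem.Set Int :=
      (PySem.Set.ofList row).foldl (fun h x => PySem.Set.union h (index.getD x PySem.Set.empty)) PySem.Set.empty
    let pairs := st.1 + (PySem.Set.len hits : Int)
    match st.2 with
    | some f => (pairs, some f)
    | none =>
      if hits.isEmpty then (pairs, none)
      else
        -- min(hits): hits is non-empty here, so min? is some
        let j0 := (PySem.List.min? hits (fun y => y)).getD 0
        (pairs, some ((row.countP (fun x => (index.getD x PySem.Set.empty).contains j0) : Nat) : Int))) (0, none)
  -- `first_len is None` here means Python B raises (outside Pre_); .getD 0 is a dummy
  (order_number_1 + order_number_2 - st.1, order_number_1 + order_number_2 - st.2.getD 0)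

-- ===== PRECONDITION & SPEC =====
-- Pre_ excludes exactly the inputs where every cross intersection is empty: there A
-- raises IndexError (intersection_matrix[0] on an empty list) and B raises TypeError.
def Pre_commum_supermatrix (matrix_number_1 : List (List Int)) (matrix_number_2 : List (List Int)) (order_number_1 : Int) (order_number_2 : Int) : Prop :=
  ∃ r1 ∈ matrix_number_1, ∃ r2 ∈ matrix_number_2, ∃ x ∈ r1, x ∈ r2
instance (matrix_number_1 : List (List Int)) (matrix_number_2 : List (List Int)) (order_number_1 : Int) (order_number_2 : Int) : Decidable (Pre_commum_supermatrix matrix_number_1 matrix_number_2 order_number_1 order_number_2) := by unfold Pre_commum_supermatrix; infer_instance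

def pvWitness_commum_supermatrix : List (List Int) × List (List Int) × Int × Int := ([[1, 2], [3]], [[2, 4]], 2, 2)

def Spec_commum_supermatrix (matrix_number_1 : List (List Int)) (matrix_number_2 : List (List Int)) (order_number_1 : Int) (order_number_2 : Int) (out : Int × Int) : Prop := out = commum_supermatrix_alt matrix_number_1 matrix_number_2 order_number_1 order_number_2
instance (matrix_number_1 : List (List Int)) (matrix_number_2 : List (List Int)) (order_number_1 : Int) (order_number_2 : Int) (out : Int × Int) : Decidable (Spec_commum_supermatrix matrix_number_1 matrix_number_2 order_number_1 order_number_2 out) := by unfold Spec_commum_supermatrix; infer_instance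

-- ===== CLAIM (what is proved, stated in full; the proofs are below) =====
def Claim_equal_commum_supermatrix : Prop := ∀ (matrix_number_1 : List (List Int)) (matrix_number_2 : List (List Int)) (order_number_1 : Int) (order_number_2 : Int), Dom_commum_supermatrix matrix_number_1 matrix_number_2 order_number_1 order_number_2 → Pre_commum_supermatrix matrix_number_1 matrix_number_2 order_number_1 order_number_2 → Spec_commum_supermatrix matrix_number_1 matrix_number_2 order_number_1 order_number_2 (commum_supermatrix matrix_number_1 matrix_number_2 order_number_1 order_number_2)

-- ===== LEMMAS AND PROOFS =====

-- intersection of one pair of rows, and the flat i-major list A builds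
def pvInter (r1 r2 : List Int) : List Int := r1.filter (fun x => (PySem.Set.ofList r2).contains x)

def pvFlat (m1 m2 : List (List Int)) : List (List Int) := m1.flatMap (fun r1 => m2.map (fun r2 => pvInter r1 r2))

def pvNatToInt (k : Nat) : Int := (k : Int)

theorem nce_eq (m1 m2 : List (List Int)) : number_commum_elements m1 m2 = pvFlat m1 m2 := by
  unfold number_commum_elements pvFlat pvInter
  rw [PySem.List.foldl_pyRange_zero_pyGetD m1 [] (fun acc r1 =>
    (PySem.List.pyRange 0 (PySem.List.len m2)).foldl (fun acc j =>
      acc ++ [r1.filter (fun x => (PySem.Set.ofList (PySem.List.pyGetD m2 j [])).contains x)]) acc) []]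
  have hin : ∀ (r1 : List Int) (acc : List (List Int)),
      (PySem.List.pyRange 0 (PySem.List.len m2)).foldl (fun acc j =>
        acc ++ [r1.filter (fun x => (PySem.Set.ofList (PySem.List.pyGetD m2 j [])).contains x)]) acc
      = acc ++ m2.map (fun r2 => r1.filter (fun x => (PySem.Set.ofList r2).contains x)) := by
    intro r1 acc
    rw [PySem.List.foldl_pyRange_zero_pyGetD m2 [] (fun acc r2 =>
      acc ++ [r1.filter (fun x => (PySem.Set.ofList r2).contains x)]) acc]
    exact PySem.List.foldl_append_singleton_eq_map _ _ _
  simp only [hin]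
  exact PySem.List.foldl_append_eq_flatMap _ _ _

-- === index characterisation ===

def pvIdx (m2 : List (List Int)) : PySem.Dict Int (PySem.Set Int) :=
  (PySem.List.pyRange 0 (PySem.List.len m2)).foldl (fun d j =>
    (PySem.List.pyGetD m2 j []).foldl (fun d x =>
      d.modify x PySem.Set.empty (fun s => PySem.Set.add s j)) d) PySem.Dict.empty

theorem idx_inner_mem (row : List Int) (j : Int) (d : PySem.Dict Int (PySem.Set Int)) (v j' : Int) :
    (j' ∈ (row.foldl (fun d x => d.modify x PySem.Set.empty (fun s => PySem.Set.add s j)) d).getD v PySem.Set.empty ↔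
      j' ∈ d.getD v PySem.Set.empty ∨ (v ∈ row ∧ j' = j)) := by
  induction row generalizing d with
  | nil => simp
  | cons a t ih =>
    rw [List.foldl_cons, ih, PySem.Dict.getD_modify]
    by_cases hv : v = a
    · subst hv
      rw [if_pos rfl, PySem.Set.mem_add]
      simp only [List.mem_cons]
      tauto
    · rw [if_neg hv]
      simp only [List.mem_cons]
      tauto

theorem idx_outer_mem (L : List (Int × List Int)) (d : PySem.Dict Int (PySem.Set Int)) (v j' : Int) :
    (j' ∈ (L.foldl (fun d p => p.2.foldl (fun d x => d.modify x PySem.Set.empty (fun s => PySem.Set.add s p.1)) d) d).getD v PySem.Set.empty ↔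
      j' ∈ d.getD v PySem.Set.empty ∨ ∃ p ∈ L, v ∈ p.2 ∧ j' = p.1) := by
  induction L generalizing d with
  | nil => simp
  | cons q t ih =>
    rw [List.foldl_cons, ih, idx_inner_mem]
    constructor
    · rintro ((h | h) | ⟨p, hp, h⟩)
      · exact Or.inl h
      · exact Or.inr ⟨q, by simp, h.1, h.2⟩
      · exact Or.inr ⟨p, by simp [hp], h⟩
    · rintro (h | ⟨p, hp, h⟩)
      · exact Or.inl (Or.inl h)
      · rcases List.mem_cons.mp hp with rfl | hp
        · exact Or.inl (Or.inr ⟨h.1, h.2⟩)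
        · exact Or.inr ⟨p, hp, h⟩

theorem pvIdx_mem (m2 : List (List Int)) (v j' : Int) :
    (j' ∈ (pvIdx m2).getD v PySem.Set.empty ↔
      ∃ k : Nat, ∃ h : k < m2.length, v ∈ m2[k] ∧ j' = (k : Int)) := by
  unfold pvIdx
  rw [show (PySem.List.pyRange 0 (PySem.List.len m2)).foldl (fun d j =>
        (PySem.List.pyGetD m2 j []).foldl (fun d x =>
          d.modify x PySem.Set.empty (fun s => PySem.Set.add s j)) d) PySem.Dict.empty
      = (PySem.List.enumerate m2 0).foldl (fun d p =>
          p.2.foldl (fun d x => d.modify x PySem.Set.empty (fun s => PySem.Set.add s p.1)) d) PySem.Dict.empty by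
    rw [PySem.List.enumerate_eq_map_pyRange m2 [], List.foldl_map]]
  rw [idx_outer_mem]
  simp only [PySem.Dict.getD_empty]
  constructor
  · rintro (h | ⟨p, hp, hv, hj⟩)
    · simp [PySem.Set.empty] at h
    · rcases (PySem.List.mem_enumerate_iff _ _ _).mp hp with ⟨k, hk, rfl⟩
      exact ⟨k, hk, by simpa using hv, by simpa using hj⟩
  · rintro ⟨k, hk, hv, rfl⟩
    exact Or.inr ⟨((0 + k : Int), m2[k]), (PySem.List.mem_enumerate_iff _ _ _).mpr ⟨k, hk, rfl⟩, hv, by simp⟩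

-- === hits characterisation ===

def pvHits (m2 : List (List Int)) (row : List Int) : PySem.Set Int :=
  (PySem.Set.ofList row).foldl (fun h x => PySem.Set.union h ((pvIdx m2).getD x PySem.Set.empty)) PySem.Set.empty

theorem hits_fold_mem (idx : PySem.Dict Int (PySem.Set Int)) (l : List Int) (h0 : PySem.Set Int) (j : Int) :
    (j ∈ l.foldl (fun h x => PySem.Set.union h (idx.getD x PySem.Set.empty)) h0 ↔
      j ∈ h0 ∨ ∃ x ∈ l, j ∈ idx.getD x PySem.Set.empty) := by
  induction l generalizing h0 with
  | nil => simp
  | cons a t ih =>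
    rw [List.foldl_cons, ih]
    rw [PySem.Set.mem_union]
    constructor
    · rintro ((h | h) | ⟨x, hx, h⟩)
      · exact Or.inl h
      · exact Or.inr ⟨a, by simp, h⟩
      · exact Or.inr ⟨x, by simp [hx], h⟩
    · rintro (h | ⟨x, hx, h⟩)
      · exact Or.inl (Or.inl h)
      · rcases List.mem_cons.mp hx with rfl | hx
        · exact Or.inl (Or.inr h)
        · exact Or.inr ⟨x, hx, h⟩

theorem hits_fold_nodup (idx : PySem.Dict Int (PySem.Set Int)) (l : List Int) (h0 : PySem.Set Int) (hn : h0.Nodup) :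
    (l.foldl (fun h x => PySem.Set.union h (idx.getD x PySem.Set.empty)) h0).Nodup := by
  induction l generalizing h0 with
  | nil => exact hn
  | cons a t ih => exact ih _ (PySem.Set.nodup_union _ _ hn)

theorem pvHits_mem (m2 : List (List Int)) (row : List Int) (j : Int) :
    (j ∈ pvHits m2 row ↔ ∃ k : Nat, ∃ h : k < m2.length, j = (k : Int) ∧ ∃ x ∈ row, x ∈ m2[k]) := by
  unfold pvHits
  rw [hits_fold_mem]
  simp only [PySem.Set.empty, List.not_mem_nil, false_or]
  constructor
  · rintro ⟨x, hx, h⟩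
    rcases (pvIdx_mem m2 x j).mp h with ⟨k, hk, hv, rfl⟩
    exact ⟨k, hk, rfl, x, (PySem.Set.mem_ofList _ _).mp hx, hv⟩
  · rintro ⟨k, hk, rfl, x, hx, hv⟩
    exact ⟨x, (PySem.Set.mem_ofList _ _).mpr hx, (pvIdx_mem m2 x _).mpr ⟨k, hk, hv, rfl⟩⟩

theorem pvHits_nodup (m2 : List (List Int)) (row : List Int) : (pvHits m2 row).Nodup :=
  hits_fold_nodup _ _ _ List.nodup_nil

-- === counting: |hits| = number of rows of m2 with non-empty intersection ===

theorem inter_hit_iff (r1 r2 : List Int) : ((!(pvInter r1 r2).isEmpty) = true) ↔ ∃ x ∈ r1, x ∈ r2 := by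
  simp [pvInter, List.isEmpty_eq_false_iff, List.filter_eq_nil_iff, PySem.Set.mem_ofList]

def pvHitIdx (m2 : List (List Int)) (row : List Int) : List Nat :=
  (List.range m2.length).filter (fun k => !(pvInter row (m2.getD k [])).isEmpty)

theorem pvHits_perm (m2 : List (List Int)) (row : List Int) :
    (pvHits m2 row).Perm (List.map pvNatToInt (pvHitIdx m2 row)) := by
  rw [List.perm_ext_iff_of_nodup (pvHits_nodup m2 row)]
  · intro j
    rw [pvHits_mem]
    simp only [pvHitIdx, pvNatToInt, List.mem_map, List.mem_filter, List.mem_range]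
    constructor
    · rintro ⟨k, hk, rfl, hx⟩
      refine ⟨k, ⟨hk, ?_⟩, rfl⟩
      rw [inter_hit_iff, List.getD_eq_getElem _ _ hk]
      exact hx
    · rintro ⟨k, ⟨hk, hp⟩, rfl⟩
      rw [inter_hit_iff, List.getD_eq_getElem _ _ hk] at hp
      exact ⟨k, hk, rfl, hp⟩
  · exact List.Nodup.map (f := pvNatToInt)
      (fun a b hab => by simpa [pvNatToInt] using hab)
      ((List.nodup_range).filter _)

theorem filter_length_eq_range (l : List (List Int)) (p : List Int → Bool) (dflt : List Int) :
    ((List.range l.length).filter (fun k => p (l.getD k dflt))).length = (l.filter p).length := by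
  induction l with
  | nil => simp
  | cons a t ih =>
    rw [List.length_cons, List.range_succ_eq_map]
    have hmap : ((List.range t.length).map Nat.succ).filter (fun k => p ((a :: t).getD k dflt))
        = ((List.range t.length).filter (fun k => p (t.getD k dflt))).map Nat.succ := by
      rw [List.filter_map]
      congr 1
    rw [List.filter_cons, List.filter_cons, List.getD_cons_zero, hmap]
    by_cases hp : p a
    · rw [if_pos hp, if_pos hp, List.length_cons, List.length_cons, List.length_map, ih]
    · rw [if_neg hp, if_neg hp, List.length_map, ih]

theorem hits_len (m2 : List (List Int)) (row : List Int) :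
    (pvHits m2 row).length = (m2.filter (fun r2 => !(pvInter row r2).isEmpty)).length := by
  rw [(pvHits_perm m2 row).length_eq, List.length_map]
  unfold pvHitIdx
  exact filter_length_eq_range m2 (fun r2 => !(pvInter row r2).isEmpty) []

-- === first non-empty intersection: min of hits picks A's first kept row ===

theorem filter_head_least (l : List (List Int)) (p : List Int → Bool) (dflt : List Int) (k0 : Nat)
    (hk0 : k0 < l.length) (hp : p (l.getD k0 dflt))
    (hmin : ∀ k, k < l.length → p (l.getD k dflt) → k0 ≤ k) :
    (l.filter p).head? = some (l.getD k0 dflt) := by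
  induction l generalizing k0 with
  | nil => simp at hk0
  | cons a t ih =>
    by_cases ha : p a
    · have h0 : k0 = 0 := Nat.le_antisymm (hmin 0 (by simp) (by simpa using ha)) (Nat.zero_le _)
      subst h0
      simp [ha]
    · cases k0 with
      | zero => rw [List.getD_cons_zero] at hp; exact absurd hp ha
      | succ k' =>
        rw [List.filter_cons, if_neg (by simp [ha])]
        rw [List.getD_cons_succ] at hp ⊢
        exact ih k' (by simpa using hk0) hp (fun k hk hpk => by
          have := hmin (k + 1) (by simpa using hk) (by simpa using hpk)
          omega)

-- === B's outer fold characterisation ===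

def pvFirstLen (m2 : List (List Int)) (row : List Int) : Option Int :=
  if (pvHits m2 row).isEmpty then none
  else
    let j0 := (PySem.List.min? (pvHits m2 row) (fun y => y)).getD 0
    some ((row.countP (fun x => ((pvIdx m2).getD x PySem.Set.empty).contains j0) : Nat) : Int)

-- one step of B's outer loop (definitionally the port's loop body)
def pvStep (m2 : List (List Int)) (st : Int × Option Int) (row : List Int) : Int × Option Int :=
  let hits : PySem.Set Int :=
    (PySem.Set.ofList row).foldl (fun h x => PySem.Set.union h ((pvIdx m2).getD x PySem.Set.empty)) PySem.Set.empty
  let pairs := st.1 + (PySem.Set.len hits : Int)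
  match st.2 with
  | some f => (pairs, some f)
  | none =>
    if hits.isEmpty then (pairs, none)
    else
      let j0 := (PySem.List.min? hits (fun y => y)).getD 0
      (pairs, some ((row.countP (fun x => ((pvIdx m2).getD x PySem.Set.empty).contains j0) : Nat) : Int))

theorem alt_fold (m1 m2 : List (List Int)) (c : Int) (f : Option Int) :
    m1.foldl (pvStep m2) (c, f)
    = (c + ((m1.map (fun row => ((pvHits m2 row).length : Int))).sum),
       f.or (m1.findSome? (pvFirstLen m2))) := by
  induction m1 generalizing c f with
  | nil => simp
  | cons row t ih =>
    rw [List.foldl_cons]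
    have hhits : ((PySem.Set.ofList row).foldl (fun h x => PySem.Set.union h ((pvIdx m2).getD x PySem.Set.empty)) PySem.Set.empty) = pvHits m2 row := rfl
    cases f with
    | some v =>
      have hstep : pvStep m2 (c, some v) row = (c + PySem.Set.len (pvHits m2 row), some v) := rfl
      rw [hstep, ih]
      simp [PySem.Set.len, Option.or, add_assoc]
    | none =>
      by_cases he : (pvHits m2 row).isEmpty
      · have hstep : pvStep m2 (c, none) row = (c + PySem.Set.len (pvHits m2 row), none) := by
          simp only [pvStep, hhits]
          rw [if_pos he]
        rw [hstep, ih]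
        have hfl : pvFirstLen m2 row = none := by
          unfold pvFirstLen
          rw [if_pos he]
        simp [PySem.Set.len, Option.or, hfl, add_assoc]
      · have hstep : pvStep m2 (c, none) row
            = (c + PySem.Set.len (pvHits m2 row),
               some ((row.countP (fun x => ((pvIdx m2).getD x PySem.Set.empty).contains
                 ((PySem.List.min? (pvHits m2 row) (fun y => y)).getD 0)) : Nat) : Int)) := by
          simp only [pvStep, hhits]
          rw [if_neg he]
        rw [hstep, ih]
        have hfl : pvFirstLen m2 row = some ((row.countP (fun x =>
            ((pvIdx m2).getD x PySem.Set.empty).contains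
              ((PySem.List.min? (pvHits m2 row) (fun y => y)).getD 0)) : Nat) : Int) := by
          unfold pvFirstLen
          rw [if_neg he]
        simp [PySem.Set.len, Option.or, hfl, add_assoc]

-- === A's side: length and head of the filtered flat list ===

theorem flat_filter (m1 m2 : List (List Int)) :
    (pvFlat m1 m2).filter (fun r => !r.isEmpty)
      = m1.flatMap (fun r1 => (m2.filter (fun r2 => !(pvInter r1 r2).isEmpty)).map (pvInter r1)) := by
  unfold pvFlat
  rw [List.filter_flatMap]
  congr 1; funext r1
  rw [List.filter_map]
  rfl

theorem head?_flatMap {α β : Type} (l : List α) (f : α → List β) :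
    (l.flatMap f).head? = l.findSome? (fun a => (f a).head?) := by
  induction l with
  | nil => simp
  | cons a t ih =>
    rw [List.flatMap_cons, List.findSome?_cons]
    cases h : (f a).head? with
    | some v =>
      rw [List.head?_append_of_ne_nil]
      · exact h
      · exact fun hn => by simp [hn] at h
    | none =>
      have : f a = [] := by cases hfa : (f a) <;> simp_all
      simp [this, ih]

theorem findSome?_map {α β γ : Type} (l : List α) (g : α → Option β) (h : β → γ) :
    (l.findSome? g).map h = l.findSome? (fun a => (g a).map h) := by
  induction l with
  | nil => simp
  | cons a t ih =>
    rw [List.findSome?_cons, List.findSome?_cons]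
    cases hg : g a <;> simp [ih]

-- per-row equality of the first-length options
theorem firstLen_eq (m2 : List (List Int)) (row : List Int) :
    (((m2.filter (fun r2 => !(pvInter row r2).isEmpty)).map (pvInter row)).head?).map (fun r => (r.length : Int))
      = pvFirstLen m2 row := by
  by_cases he : (pvHits m2 row) = []
  · have hf : m2.filter (fun r2 => !(pvInter row r2).isEmpty) = [] := by
      rw [List.filter_eq_nil_iff]
      intro r2 hr2 hb
      rw [inter_hit_iff] at hb
      rcases hb with ⟨x, hx1, hx2⟩
      rcases List.getElem_of_mem hr2 with ⟨k, hk, rfl⟩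
      have : ((k : Int)) ∈ pvHits m2 row := (pvHits_mem m2 row _).mpr ⟨k, hk, rfl, x, hx1, hx2⟩
      simp [he] at this
    have hfl : pvFirstLen m2 row = none := by
      unfold pvFirstLen
      rw [if_pos (by simp [he])]
    rw [hf, hfl]
    simp
  · rcases hmin : PySem.List.min? (pvHits m2 row) (fun y => y) with _ | j0
    · rw [PySem.List.min?_eq_none_iff] at hmin
      exact absurd hmin he
    have hj0mem : j0 ∈ pvHits m2 row := PySem.List.min?_mem hmin
    have hj0min : ∀ y ∈ pvHits m2 row, j0 ≤ y := PySem.List.min?_isMin hmin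
    rcases (pvHits_mem _ _ _).mp hj0mem with ⟨k0, hk0, hj0eq, hx⟩
    have hp0 : (!(pvInter row (m2.getD k0 [])).isEmpty) = true := by
      rw [inter_hit_iff, List.getD_eq_getElem _ _ hk0]
      exact hx
    have hmin' : ∀ k, k < m2.length → (!(pvInter row (m2.getD k [])).isEmpty) = true → k0 ≤ k := by
      intro k hk hp
      rw [inter_hit_iff] at hp
      rw [List.getD_eq_getElem _ _ hk] at hp
      have hmem : ((k : Int)) ∈ pvHits m2 row :=
        (pvHits_mem m2 row _).mpr ⟨k, hk, rfl, hp⟩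
      have hle := hj0min _ hmem
      rw [hj0eq] at hle
      exact_mod_cast hle
    rw [List.head?_map, filter_head_least m2 _ [] k0 hk0 hp0 hmin']
    unfold pvFirstLen
    rw [if_neg (by simp [List.isEmpty_iff, he]), hmin]
    have hcnt : row.countP (fun x => ((pvIdx m2).getD x PySem.Set.empty).contains ((some j0).getD 0))
        = (pvInter row (m2.getD k0 [])).length := by
      rw [pvInter, ← List.countP_eq_length_filter]
      apply List.countP_congr
      intro x _
      have h1 : (((pvIdx m2).getD x PySem.Set.empty).contains ((some j0).getD 0)) = true ↔ x ∈ m2.getD k0 [] := by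
        rw [Option.getD_some, PySem.Set.contains_iff, pvIdx_mem]
        constructor
        · rintro ⟨k, hk, hv, hkk⟩
          have hkeq : k = k0 := by
            rw [hj0eq] at hkk
            exact_mod_cast hkk.symm
          subst hkeq
          rw [List.getD_eq_getElem _ _ hk]
          exact hv
        · intro hv
          rw [List.getD_eq_getElem _ _ hk0] at hv
          exact ⟨k0, hk0, hv, hj0eq⟩
      have h2 : ((PySem.Set.ofList (m2.getD k0 [])).contains x) = true ↔ x ∈ m2.getD k0 [] := by
        rw [PySem.Set.contains_iff, PySem.Set.mem_ofList]
      rw [Bool.eq_iff_iff, h1, h2]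
      simp
    simp only [Option.map_some, Option.some.injEq]
    rw [← hcnt]

theorem flat_len_nat (m1 m2 : List (List Int)) :
    ((pvFlat m1 m2).filter (fun r => !r.isEmpty)).length
      = (m1.map (fun row => (pvHits m2 row).length)).sum := by
  rw [flat_filter, List.length_flatMap]
  induction m1 with
  | nil => simp
  | cons row t _ =>
    simp only [List.map_cons, List.sum_cons, List.length_map, hits_len]

theorem flat_len (m1 m2 : List (List Int)) :
    (PySem.List.len ((pvFlat m1 m2).filter (fun r => !r.isEmpty)))
      = (m1.map (fun row => ((pvHits m2 row).length : Int))).sum := by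
  rw [PySem.List.len, flat_len_nat m1 m2, Nat.cast_list_sum, List.map_map]
  rfl

theorem pyGet?_zero (xs : List (List Int)) : PySem.List.pyGet? xs 0 = xs.head? := by
  cases xs <;> simp [PySem.List.pyGet?, PySem.List.pyIdx?]

-- the two port bodies agree (for the already-swapped pair of matrices)
theorem ports_eq (q1 q2 : List (List Int)) (o1 o2 : Int) :
    (o1 + o2 - PySem.List.len ((pvFlat q1 q2).filter (fun x => !x.isEmpty)),
     o1 + o2 - PySem.List.len ((PySem.List.pyGet? ((pvFlat q1 q2).filter (fun x => !x.isEmpty)) 0).getD []))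
    = (o1 + o2 - (q1.foldl (pvStep q2) ((0 : Int), (none : Option Int))).1,
       o1 + o2 - ((q1.foldl (pvStep q2) ((0 : Int), (none : Option Int))).2.getD 0)) := by
  rw [alt_fold]
  have hopt : ((pvFlat q1 q2).filter (fun x => !x.isEmpty)).head?.map (fun r => (r.length : Int))
      = q1.findSome? (pvFirstLen q2) := by
    rw [flat_filter, head?_flatMap, findSome?_map]
    simp only [firstLen_eq]
  rw [Prod.mk.injEq]
  constructor
  · rw [flat_len]
    ring
  · rw [pyGet?_zero]
    simp only [Option.none_or]
    rw [← hopt]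
    cases hh : ((pvFlat q1 q2).filter (fun x => !x.isEmpty)).head? with
    | none => simp [PySem.List.len]
    | some h => simp [PySem.List.len]

-- ===== VERDICT (by name: the statement is the Claim_ definition above) =====
theorem commum_supermatrix_spec : Claim_equal_commum_supermatrix := by
  unfold Claim_equal_commum_supermatrix
  intro m1 m2 o1 o2 _ _
  unfold Spec_commum_supermatrix commum_supermatrix commum_supermatrix_alt
  simp only [nce_eq]
  by_cases hc : pyLtMat m1 m2
  · rw [if_pos hc]
    exact ports_eq m2 m1 o1 o2
  · rw [if_neg hc]
    exact ports_eq m1 m2 o1 o2
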